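-- pv_equiv track=rewrite | github.com/louismaillet/BUT1 | semestre1/init_system_2/TP_10 Représentation de la mémoire, dictionnaires, matrices-20241127/pokedex/pokedex.py | v1_to_v2
-- ===== SOURCE A (Python) =====
-- def v1_to_v2(pokedex_v1):
--     """
--     param: prend en paramètre un pokedex version 1
--     renvoie le même pokedex mais en version 2
--     """
--     pokedex_v2 = {}
--     for nom,att in pokedex_v1 :
--         if nom in pokedex_v2 :
--             pokedex_v2[nom].add(att)
--         else :
--             pokedex_v2[nom] = {att}
--     return pokedex_v2
-- ===== SOURCE B (Python) =====
-- def v1_to_v2(pokedex_v1):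
--     """
--     param: prend en paramètre un pokedex version 1
--     renvoie le même pokedex mais en version 2
--     """
--     names = list(dict.fromkeys(nom for nom, _ in pokedex_v1))
--     return {nom: {att for n, att in pokedex_v1 if n == nom} for nom in names}
-- ===== Notes on version B (the rewrite author's own statement) =====
-- stated objective: alternative
-- what changed: Replaces the single incremental scan with dict-membership tests and in-place set mutation by a two-phase grouping: first dedupe the names in first-occurrence order, then build each name's attribute set by one comprehension over the whole list.
import Mathlib
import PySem

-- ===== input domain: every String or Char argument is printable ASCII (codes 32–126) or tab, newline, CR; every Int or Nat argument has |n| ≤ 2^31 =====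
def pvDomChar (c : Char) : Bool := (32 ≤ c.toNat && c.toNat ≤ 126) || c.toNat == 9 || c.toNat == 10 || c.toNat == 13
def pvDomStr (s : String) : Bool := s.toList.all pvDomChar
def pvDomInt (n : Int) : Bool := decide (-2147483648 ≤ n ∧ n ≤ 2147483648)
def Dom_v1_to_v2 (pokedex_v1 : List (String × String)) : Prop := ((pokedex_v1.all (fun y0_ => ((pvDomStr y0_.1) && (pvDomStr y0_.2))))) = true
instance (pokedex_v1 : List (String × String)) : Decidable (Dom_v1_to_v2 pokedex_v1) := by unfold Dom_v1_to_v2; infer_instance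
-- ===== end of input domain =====

-- B groups by first deduplicating the names and then collecting each name's attributes
-- in one comprehension pass per name, instead of A's single scan with membership tests
-- (objective: alternative decomposition, same results; not claimed faster).

-- ===== PORT A =====
def v1_to_v2 (pokedex_v1 : List (String × String)) : List (String × List String) :=
  (pokedex_v1.foldl
    (fun d p =>
      if d.contains p.1 then
        d.modify p.1 [] (fun s => PySem.Set.add s p.2)      -- pokedex_v2[nom].add(att)
      else
        d.insert p.1 (PySem.Set.ofList [p.2]))              -- pokedex_v2[nom] = {att}
    PySem.Dict.empty).items

-- ===== PORT B =====
def v1_to_v2_alt (pokedex_v1 : List (String × String)) : List (String × List String) :=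
  (PySem.List.dedup (pokedex_v1.map Prod.fst)).map          -- list(dict.fromkeys(...))
    (fun nom =>
      (nom, PySem.Set.ofList
        ((pokedex_v1.filter (fun p => p.1 == nom)).map Prod.snd)))   -- {att for n,att in ... if n == nom}

-- ===== PRECONDITION & SPEC =====
def Spec_v1_to_v2 (pokedex_v1 : List (String × String)) (out : List (String × List String)) : Prop := out = v1_to_v2_alt pokedex_v1
instance (pokedex_v1 : List (String × String)) (out : List (String × List String)) : Decidable (Spec_v1_to_v2 pokedex_v1 out) := by unfold Spec_v1_to_v2; infer_instance

-- ===== CLAIM (what is proved, stated in full; the proofs are below) =====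
def Claim_equal_v1_to_v2 : Prop := ∀ (pokedex_v1 : List (String × String)), Dom_v1_to_v2 pokedex_v1 → Spec_v1_to_v2 pokedex_v1 (v1_to_v2 pokedex_v1)

-- ===== LEMMAS AND PROOFS =====

-- The group built for name n from list l (B's per-name comprehension).
def pvGroup (l : List (String × String)) (n : String) : String × List String :=
  (n, PySem.Set.ofList ((l.filter (fun p => p.1 == n)).map Prod.snd))

-- Invariant: after A's fold over l, the dict's items are exactly B's groups,
-- one per distinct name in first-occurrence order.
theorem pv_fold_items (l : List (String × String)) :
    (l.foldl
      (fun d p =>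
        if d.contains p.1 then
          d.modify p.1 [] (fun s => PySem.Set.add s p.2)
        else
          d.insert p.1 (PySem.Set.ofList [p.2]))
      PySem.Dict.empty).items
    = (PySem.Set.ofList (l.map Prod.fst)).map (pvGroup l) := by
  induction l using List.reverseRecOn with
  | nil => rfl
  | append_singleton xs p ih =>
    rw [List.foldl_append, List.foldl_cons, List.foldl_nil]
    set step := fun (d : PySem.Dict String (List String)) (p : String × String) =>
      if d.contains p.1 then
        d.modify p.1 [] (fun s => PySem.Set.add s p.2)
      else
        d.insert p.1 (PySem.Set.ofList [p.2]) with hstep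
    set d := xs.foldl step PySem.Dict.empty with hd
    have hN : d.keys = PySem.Set.ofList (xs.map Prod.fst) := by
      show d.items.map Prod.fst = _
      rw [ih, List.map_map]
      have : (Prod.fst ∘ pvGroup xs) = id := by
        funext n; rfl
      rw [this, List.map_id]
    have hnodup : d.keys.Nodup := by rw [hN]; exact PySem.Set.nodup_ofList _
    have hmapfst : (xs ++ [p]).map Prod.fst = xs.map Prod.fst ++ [p.1] := by simp
    -- the new per-name groups, compared with the old ones
    have hgroup_ne : ∀ n, n ≠ p.1 → pvGroup (xs ++ [p]) n = pvGroup xs n := by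
      intro n hn
      simp only [pvGroup, List.filter_append]
      have hpn : (p.1 == n) = false := beq_eq_false_iff_ne.mpr (Ne.symm hn)
      have : List.filter (fun q => q.1 == n) [p] = [] := by
        rw [List.filter_cons, hpn]; rfl
      rw [this, List.append_nil]
    have hgroup_eq : pvGroup (xs ++ [p]) p.1
        = (p.1, PySem.Set.add
            (PySem.Set.ofList ((xs.filter (fun q => q.1 == p.1)).map Prod.snd)) p.2) := by
      simp only [pvGroup, List.filter_append]
      have : List.filter (fun q => q.1 == p.1) [p] = [p] := by
        rw [List.filter_cons, beq_self_eq_true]; rfl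
      rw [this, List.map_append]
      simp only [List.map_cons, List.map_nil]
      rw [PySem.Set.ofList_append_singleton]
    by_cases hc : d.contains p.1 = true
    · -- name already present: A overwrites in place, name list unchanged
      have hmem : p.1 ∈ PySem.Set.ofList (xs.map Prod.fst) := by
        rw [← hN]; exact (PySem.Dict.contains_iff_mem_keys d p.1).mp hc
      have hmemxs : p.1 ∈ xs.map Prod.fst := (PySem.Set.mem_ofList _ _).mp hmem
      have hget : d.getD p.1 []
          = PySem.Set.ofList ((xs.filter (fun q => q.1 == p.1)).map Prod.snd) := by
        have hmemi : (p.1, PySem.Set.ofList ((xs.filter (fun q => q.1 == p.1)).map Prod.snd))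
            ∈ d.items := by
          rw [ih]
          exact List.mem_map_of_mem (f := pvGroup xs) hmem
        exact PySem.Dict.getD_of_mem_items d hmemi hnodup []
      have hadd : PySem.Set.ofList (xs.map Prod.fst ++ [p.1])
          = PySem.Set.ofList (xs.map Prod.fst) := by
        rw [PySem.Set.ofList_append_singleton, PySem.Set.add,
          if_pos ((PySem.Set.contains_iff _ _).mpr hmem)]
      simp only [hc, if_pos, PySem.Dict.modify]
      rw [PySem.Dict.items_insert_of_contains d _ hc, ih, List.map_map,
        hmapfst, hadd]
      apply List.map_inj_left.mpr
      intro n hn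
      by_cases hnp : n = p.1
      · show (if ((pvGroup xs n).1 == p.1) = true
              then (p.1, PySem.Set.add (d.getD p.1 []) p.2) else pvGroup xs n)
            = pvGroup (xs ++ [p]) n
        rw [hnp, hgroup_eq]
        have h1 : ((pvGroup xs p.1).1 == p.1) = true := beq_self_eq_true p.1
        rw [if_pos h1, hget]
      · show (if ((pvGroup xs n).1 == p.1) = true
              then (p.1, PySem.Set.add (d.getD p.1 []) p.2) else pvGroup xs n)
            = pvGroup (xs ++ [p]) n
        have h1 : ((pvGroup xs n).1 == p.1) = false := beq_eq_false_iff_ne.mpr hnp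
        rw [if_neg (by rw [h1]; exact Bool.false_ne_true), hgroup_ne n hnp]
    · -- new name: A appends, B's name list gains p.1 at the end
      have hc' : d.contains p.1 = false := by simpa using hc
      have hnmem : p.1 ∉ PySem.Set.ofList (xs.map Prod.fst) := by
        rw [← hN]; intro h
        exact hc ((PySem.Dict.contains_iff_mem_keys d p.1).mpr h)
      have hnmemxs : p.1 ∉ xs.map Prod.fst := fun h =>
        hnmem ((PySem.Set.mem_ofList _ _).mpr h)
      have hfilter : xs.filter (fun q => q.1 == p.1) = [] := by
        apply List.filter_eq_nil_iff.mpr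
        intro q hq hq'
        have hq1 : q.1 = p.1 := by exact beq_iff_eq.mp hq'
        exact hnmemxs (hq1 ▸ List.mem_map_of_mem (f := Prod.fst) hq)
      have hadd : PySem.Set.ofList (xs.map Prod.fst ++ [p.1])
          = PySem.Set.ofList (xs.map Prod.fst) ++ [p.1] := by
        rw [PySem.Set.ofList_append_singleton, PySem.Set.add,
          if_neg (fun h => hnmem ((PySem.Set.contains_iff _ _).mp h))]
      simp only [hc', Bool.false_eq_true, if_false]
      rw [PySem.Dict.items_insert_of_not_contains d _ hc', ih, hmapfst, hadd,
        List.map_append]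
      congr 1
      · apply List.map_inj_left.mpr
        intro n hn
        have hnp : n ≠ p.1 := fun h => hnmem (h ▸ hn)
        exact (hgroup_ne n hnp).symm
      · simp only [List.map_cons, List.map_nil]
        rw [hgroup_eq, hfilter]
        rfl

-- ===== VERDICT (by name: the statement is the Claim_ definition above) =====
theorem v1_to_v2_spec : Claim_equal_v1_to_v2 := by
  intro l _
  show v1_to_v2 l = v1_to_v2_alt l
  rw [v1_to_v2, v1_to_v2_alt, pv_fold_items]
  rfl
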